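-- pv_equiv track=rewrite | github.com/TUBAF-IFI-ConnectedLecturer/Data_aggregation | cl-pipeline/stages/liascript/analyzeLiaScriptFeatures.py | _count_header_field
-- ===== SOURCE A (Python) =====
-- def _count_header_field(content, field_name):
--     """
--     Count occurrences of a field in the header (e.g., 'script:', 'link:').
--
--     Handles multi-line definitions where URLs continue on following lines:
--     script: https://example.com/lib1.js
--             https://example.com/lib2.js
--
--     Returns count of URLs found.
--     """
--     # Extract header comment block
--     start = content.find("<!--")
--     end = content.find("-->")
--     if start == -1 or end == -1:
--         return 0
--
--     header = content[start:end]
--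
--     # Count URLs in field (including continuation lines)
--     url_count = 0
--     lines = header.split('\n')
--     in_field = False
--
--     for line in lines:
--         stripped = line.strip()
--
--         # Check if this line starts the field
--         if stripped.lower().startswith(f'{field_name}:'):
--             in_field = True
--             # Get value after colon
--             value = stripped.split(':', 1)[1].strip()
--             if value and value.startswith('http'):
--                 url_count += 1
--             continue
--
--         # If we're in field and line continues (URL on next line)
--         if in_field:
--             if stripped == '' or ':' in stripped:
--                 in_field = False
--             elif stripped.startswith('http'):
--                 url_count += 1
--
--     return url_count
-- ===== SOURCE B (Python) =====
-- def _count_header_field(content, field_name):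
--     start = content.find("<!--")
--     end = content.find("-->")
--     if start == -1 or end == -1:
--         return 0
--     lines = content[start:end].split('\n')
--     prefix = field_name + ':'
--     n = len(lines)
--     url_count = 0
--     i = 0
--     while i < n:
--         stripped = lines[i].strip()
--         if stripped.lower().startswith(prefix):
--             value = stripped.split(':', 1)[1].strip()
--             if value.startswith('http'):
--                 url_count += 1
--             # scan continuation lines; stop at the first empty or ':'-containing
--             # line and re-examine it as a possible new field start
--             j = i + 1
--             while j < n:
--                 s = lines[j].strip()
--                 if s == '' or ':' in s:
--                     break
--                 if s.startswith('http'):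
--                     url_count += 1
--                 j += 1
--             i = j
--         else:
--             i += 1
--     return url_count
-- ===== Notes on version B (the rewrite author's own statement) =====
-- stated objective: alternative
-- what changed: Replaces A's single pass with an in_field boolean flag by a nested find-then-scan-forward decomposition: an outer index walk locates field-start lines and an inner loop counts colon-free http continuation lines, breaking at the first empty or colon-containing line, which is re-fed to the outer field-start test.
import Mathlib
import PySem

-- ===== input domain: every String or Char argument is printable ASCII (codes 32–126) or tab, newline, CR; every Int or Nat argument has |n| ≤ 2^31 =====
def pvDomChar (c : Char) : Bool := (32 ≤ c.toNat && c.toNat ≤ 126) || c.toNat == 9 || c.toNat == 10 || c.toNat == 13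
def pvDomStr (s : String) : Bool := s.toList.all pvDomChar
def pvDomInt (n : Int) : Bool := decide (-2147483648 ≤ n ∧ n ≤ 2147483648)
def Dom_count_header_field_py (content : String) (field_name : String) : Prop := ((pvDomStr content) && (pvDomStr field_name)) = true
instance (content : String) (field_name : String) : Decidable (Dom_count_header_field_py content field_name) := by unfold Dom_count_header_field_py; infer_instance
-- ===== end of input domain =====

-- B replaces A's in_field boolean flag by a nested find-then-scan-forward structure
-- (explicit index / rest-list walk); objective: alternative decomposition, same cost.

-- ===== PORT A =====
-- A's loop body: state (url_count, in_field); branches in A's order.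
def pvStepA (field_name : String) (st : Int × Bool) (line : String) : Int × Bool :=
  let stripped := PySem.Str.strip line
  if PySem.Str.startswith (PySem.Str.lower stripped) (field_name ++ ":") = true then
    let value := PySem.Str.strip
      (((PySem.Str.splitMax? stripped ":" 1).getD []).getD 1 "")
    (st.1 + (if value ≠ "" ∧ PySem.Str.startswith value "http" = true then 1 else 0), true)
  else if st.2 then
    if stripped = "" ∨ PySem.Str.isIn ":" stripped = true then (st.1, false)
    else if PySem.Str.startswith stripped "http" = true then (st.1 + 1, true)
    else st
  else st

def count_header_field_py (content : String) (field_name : String) : Int :=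
  let start := PySem.Str.find content "<!--"
  let stop := PySem.Str.find content "-->"
  if start = -1 ∨ stop = -1 then 0
  else
    let header := PySem.Str.slice content (some start) (some stop)
    let lines := (PySem.Str.split? header "\n").getD []
    (lines.foldl (pvStepA field_name) (0, false)).1

-- ===== PORT B =====
-- B's inner while loop: count colon-free http continuation lines, return the
-- count together with the rest of the lines starting at the terminating line.
def pvContScan (lines : List String) : Int × List String :=
  match lines with
  | [] => (0, [])
  | l :: ls =>
    if PySem.Str.strip l = "" ∨ PySem.Str.isIn ":" (PySem.Str.strip l) = true then
      (0, l :: ls)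
    else if PySem.Str.startswith (PySem.Str.strip l) "http" = true then
      ((pvContScan ls).1 + 1, (pvContScan ls).2)
    else pvContScan ls

theorem pvContScan_length_le (lines : List String) :
    (pvContScan lines).2.length ≤ lines.length := by
  induction lines with
  | nil => simp [pvContScan]
  | cons l ls ih =>
    simp only [pvContScan]
    split_ifs <;> simp <;> omega

-- B's outer while loop over the remaining lines.
def pvScanB (pfx : String) : List String → Int
  | [] => 0
  | l :: ls =>
    if PySem.Str.startswith (PySem.Str.lower (PySem.Str.strip l)) pfx = true then
      (if PySem.Str.startswith
            (PySem.Str.strip (((PySem.Str.splitMax? (PySem.Str.strip l) ":" 1).getD []).getD 1 ""))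
            "http" = true then (1 : Int) else 0)
        + (pvContScan ls).1 + pvScanB pfx (pvContScan ls).2
    else pvScanB pfx ls
termination_by ls => ls.length
decreasing_by
  · exact Nat.lt_succ_of_le (pvContScan_length_le ls)
  · exact Nat.lt_succ_self _

def count_header_field_py_alt (content : String) (field_name : String) : Int :=
  let start := PySem.Str.find content "<!--"
  let stop := PySem.Str.find content "-->"
  if start = -1 ∨ stop = -1 then 0
  else
    let header := PySem.Str.slice content (some start) (some stop)
    let lines := (PySem.Str.split? header "\n").getD []
    pvScanB (field_name ++ ":") lines

-- ===== PRECONDITION & SPEC =====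
def Spec_count_header_field_py (content : String) (field_name : String) (out : Int) : Prop := out = count_header_field_py_alt content field_name
instance (content : String) (field_name : String) (out : Int) : Decidable (Spec_count_header_field_py content field_name out) := by unfold Spec_count_header_field_py; infer_instance

-- ===== CLAIM (what is proved, stated in full; the proofs are below) =====
def Claim_equal_count_header_field_py : Prop := ∀ (content : String) (field_name : String), Dom_count_header_field_py content field_name → Spec_count_header_field_py content field_name (count_header_field_py content field_name)

-- ===== LEMMAS AND PROOFS =====

theorem lowerChar_eq_colon {c : Char} (h : PySem.Chars.lowerChar c = ':') : c = ':' := by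
  unfold PySem.Chars.lowerChar at h
  split_ifs at h with hu
  · exfalso
    simp only [PySem.Chars.isupper, Bool.and_eq_true, decide_eq_true_eq, Char.le_def,
      UInt32.le_iff_toNat_le] at hu
    have hb : 65 ≤ c.toNat ∧ c.toNat ≤ 90 := by
      have h65 : ('A' : Char).val.toNat = 65 := rfl
      have h90 : ('Z' : Char).val.toNat = 90 := rfl
      have hc : c.toNat = c.val.toNat := rfl
      omega
    have hv : (c.toNat + 32).isValidChar := Or.inl (by omega)
    have h2 := congrArg Char.toNat h
    rw [Char.toNat_ofNat, if_pos hv] at h2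
    have h58 : (':' : Char).toNat = 58 := rfl
    omega
  · exact h

-- A field-start line (lowered, startswith field_name ++ ":") necessarily contains ':'.
theorem isIn_colon_of_fieldstart (fn s : String)
    (h : PySem.Str.startswith (PySem.Str.lower s) (fn ++ ":") = true) :
    PySem.Str.isIn ":" s = true := by
  rw [PySem.Str.startswith_eq, PySem.Chars.startswith_iff, PySem.Str.toList_lower] at h
  have hc : (':' : Char) ∈ PySem.Chars.lower s.toList := by
    apply h.mem
    simp
  have hcs : (':' : Char) ∈ s.toList := by
    unfold PySem.Chars.lower at hc
    obtain ⟨c, hcmem, hce⟩ := List.mem_map.mp hc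
    rwa [lowerChar_eq_colon hce] at hcmem
  rw [PySem.Str.isIn_eq, PySem.Chars.isIn_iff_infix]
  obtain ⟨u, v, huv⟩ := List.append_of_mem hcs
  exact ⟨u, v, by simpa using huv.symm⟩

-- startswith "http" forces the string nonempty (discharges A's redundant test).
theorem ne_empty_of_startswith_http (v : String)
    (h : PySem.Str.startswith v "http" = true) : v ≠ "" := by
  intro he
  rw [he] at h
  simp [PySem.Str.startswith_eq, PySem.Chars.startswith_iff] at h

-- The loop invariant: A's fold from state (c, false) computes c + B's scan, and
-- from state (c, true) it computes c + inner-scan count + B's scan of the rest.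
theorem main_inv (fn : String) (lines : List String) : ∀ c : Int,
    (lines.foldl (pvStepA fn) (c, false)).1 = c + pvScanB (fn ++ ":") lines ∧
    (lines.foldl (pvStepA fn) (c, true)).1 =
      c + (pvContScan lines).1 + pvScanB (fn ++ ":") (pvContScan lines).2 := by
  induction lines with
  | nil => intro c; simp [pvScanB, pvContScan]
  | cons l ls ih =>
    intro c
    constructor
    · rw [List.foldl_cons]
      simp only [pvStepA, pvScanB, Bool.false_eq_true, if_false]
      by_cases hf : PySem.Str.startswith (PySem.Str.lower (PySem.Str.strip l)) (fn ++ ":") = true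
      · rw [if_pos hf, if_pos hf]
        by_cases hsw : PySem.Str.startswith
            (PySem.Str.strip (((PySem.Str.splitMax? (PySem.Str.strip l) ":" 1).getD []).getD 1 ""))
            "http" = true
        · rw [if_pos ⟨ne_empty_of_startswith_http _ hsw, hsw⟩, if_pos hsw, (ih _).2]
          ring
        · rw [if_neg (fun hp => hsw hp.2), if_neg hsw, (ih _).2]
          ring
      · rw [if_neg hf, if_neg hf]
        exact (ih c).1
    · rw [List.foldl_cons]
      conv_rhs => simp only [pvContScan]
      simp only [pvStepA]
      rw [if_pos (trivial : True)]
      by_cases hf : PySem.Str.startswith (PySem.Str.lower (PySem.Str.strip l)) (fn ++ ":") = true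
      · have hterm : PySem.Str.strip l = "" ∨ PySem.Str.isIn ":" (PySem.Str.strip l) = true :=
          Or.inr (isIn_colon_of_fieldstart fn (PySem.Str.strip l) hf)
        rw [if_pos hf, if_pos hterm]
        dsimp only
        simp only [pvScanB]
        rw [if_pos hf]
        by_cases hsw : PySem.Str.startswith
            (PySem.Str.strip (((PySem.Str.splitMax? (PySem.Str.strip l) ":" 1).getD []).getD 1 ""))
            "http" = true
        · rw [if_pos ⟨ne_empty_of_startswith_http _ hsw, hsw⟩, if_pos hsw, (ih _).2]
          ring
        · rw [if_neg (fun hp => hsw hp.2), if_neg hsw, (ih _).2]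
          ring
      · rw [if_neg hf]
        by_cases hterm : PySem.Str.strip l = "" ∨ PySem.Str.isIn ":" (PySem.Str.strip l) = true
        · rw [if_pos hterm, if_pos hterm]
          dsimp only
          simp only [pvScanB]
          rw [if_neg hf, (ih c).1]
          ring
        · by_cases hhttp : PySem.Str.startswith (PySem.Str.strip l) "http" = true
          · rw [if_neg hterm, if_neg hterm, if_pos hhttp, if_pos hhttp]
            dsimp only
            rw [(ih _).2]
            ring
          · rw [if_neg hterm, if_neg hterm, if_neg hhttp, if_neg hhttp]
            exact (ih c).2

-- ===== VERDICT (by name: the statement is the Claim_ definition above) =====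
theorem count_header_field_py_spec : Claim_equal_count_header_field_py := by
  intro content field_name _
  simp only [Spec_count_header_field_py, count_header_field_py, count_header_field_py_alt]
  split_ifs with h
  · rfl
  · simpa using (main_inv field_name
      ((PySem.Str.split? (PySem.Str.slice content
        (some (PySem.Str.find content "<!--")) (some (PySem.Str.find content "-->"))) "\n").getD []) 0).1
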